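-- pv_equiv track=rewrite | github.com/requiem33/PisteMaster | core/algorithms/grouping.py | snake_seeding
-- ===== SOURCE A (Python) =====
-- from typing import List, Dict, Any, Optional
--
-- def snake_seeding(participants: List[int], pool_count: int) -> List[List[int]]:
--     """
--     蛇形编排法（标准击剑分组算法）。
--
--     参数:
--         participants: 选手ID列表，应按种子顺序排列（种子1在前）
--         pool_count: 要分成几组
--
--     返回:
--         分组列表，每个内层列表是一组选手ID
--     """
--     groups = [[] for _ in range(pool_count)]
--
--     for i, participant_id in enumerate(participants):
--         # 决定放在哪一组
--         group_index = i % pool_count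
--
--         # 蛇形：偶数行正向，奇数行反向
--         if (i // pool_count) % 2 == 1:
--             group_index = pool_count - 1 - group_index
--
--         groups[group_index].append(participant_id)
--
--     return groups
-- ===== SOURCE B (Python) =====
-- def snake_seeding(participants, pool_count):
--     """Snake-seed by rows: walk consecutive rows of pool_count seeds and
--     drop each row into the pools column-by-column, reversing odd rows."""
--     groups = [[] for _ in range(pool_count)]
--     start = 0
--     row = 0
--     while start < len(participants):
--         chunk = participants[start:start + pool_count]
--         for j, pid in enumerate(chunk):
--             groups[pool_count - 1 - j if row % 2 else j].append(pid)
--         start += pool_count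
--         row += 1
--     return groups
-- ===== Notes on version B (the rewrite author's own statement) =====
-- stated objective: alternative
-- what changed: Replaces the flat enumerate pass computing i % pool_count and i // pool_count per element by a row-wise walk: slice out each consecutive row of pool_count seeds and place it column-by-column, using the reversed column index on odd rows.
import Mathlib
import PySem

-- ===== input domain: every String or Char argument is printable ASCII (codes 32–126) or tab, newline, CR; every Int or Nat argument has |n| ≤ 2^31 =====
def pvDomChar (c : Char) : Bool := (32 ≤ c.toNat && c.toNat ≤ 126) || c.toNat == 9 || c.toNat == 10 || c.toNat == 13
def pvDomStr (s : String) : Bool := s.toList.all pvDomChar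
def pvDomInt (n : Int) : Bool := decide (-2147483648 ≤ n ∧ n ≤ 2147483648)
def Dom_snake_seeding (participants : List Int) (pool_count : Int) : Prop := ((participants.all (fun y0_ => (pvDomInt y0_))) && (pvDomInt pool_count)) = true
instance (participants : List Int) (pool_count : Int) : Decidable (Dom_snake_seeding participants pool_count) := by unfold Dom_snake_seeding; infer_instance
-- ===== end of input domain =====

-- B re-groups by rows (slice each row of pool_count seeds, place it column-by-column,
-- reversed columns on odd rows) instead of A's flat pass with i % pool_count / i // pool_count.

-- ===== PORT A =====
-- groups[k].append(x)  (Python list indexing + in-place append; k in range under Pre_)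
def pvAppendAt (gs : List (List Int)) (k : Int) (x : Int) : List (List Int) :=
  PySem.List.pySetD gs k (PySem.List.pyGetD gs k [] ++ [x])

-- the body of A's loop for one (i, participant_id) pair
def pvAStep (pool_count : Int) (gs : List (List Int)) (p : Int × Int) : List (List Int) :=
  let gi := PySem.Int.mod p.1 pool_count
  let gi := if PySem.Int.mod (PySem.Int.floordiv p.1 pool_count) 2 = 1 then pool_count - 1 - gi else gi
  pvAppendAt gs gi p.2

def snake_seeding (participants : List Int) (pool_count : Int) : List (List Int) :=
  let groups := (PySem.List.pyRange 0 pool_count 1).map (fun _ => ([] : List Int))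
  (PySem.List.enumerate participants).foldl (pvAStep pool_count) groups

-- ===== PORT B =====
-- B's inner loop: place one row (chunk) into the pools, column-by-column
def pvPlaceRow (pool_count row : Int) (gs : List (List Int)) (chunk : List Int) : List (List Int) :=
  (PySem.List.enumerate chunk).foldl
    (fun gs q => pvAppendAt gs (if PySem.Int.mod row 2 ≠ 0 then pool_count - 1 - q.1 else q.1) q.2) gs

-- B's while loop; fuel = participants.length only makes the recursion total (the Python
-- while terminates whenever pool_count ≥ 1 or participants is empty, i.e. on all of Pre_)
def pvBLoop (participants : List Int) (pool_count : Int) : Nat → Int → Int → List (List Int) → List (List Int)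
  | 0, _, _, gs => gs
  | fuel + 1, start, row, gs =>
    if start < (participants.length : Int) then
      let chunk := PySem.List.slice participants (some start) (some (start + pool_count))
      pvBLoop participants pool_count fuel (start + pool_count) (row + 1) (pvPlaceRow pool_count row gs chunk)
    else gs

def snake_seeding_alt (participants : List Int) (pool_count : Int) : List (List Int) :=
  let groups := (PySem.List.pyRange 0 pool_count 1).map (fun _ => ([] : List Int))
  pvBLoop participants pool_count participants.length 0 0 groups

-- ===== PRECONDITION & SPEC =====
-- A raises on pool_count ≤ 0 with a non-empty list (ZeroDivisionError for 0, IndexError for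
-- negative pool_count); those inputs are excluded. For empty participants A returns [] for any pool_count.
def Pre_snake_seeding (participants : List Int) (pool_count : Int) : Prop :=
  1 ≤ pool_count ∨ participants = []
instance (participants : List Int) (pool_count : Int) : Decidable (Pre_snake_seeding participants pool_count) := by unfold Pre_snake_seeding; infer_instance

def pvWitness_snake_seeding : List Int × Int := ([1, 2, 3, 4, 5, 6, 7], 3)

def Spec_snake_seeding (participants : List Int) (pool_count : Int) (out : List (List Int)) : Prop := out = snake_seeding_alt participants pool_count
instance (participants : List Int) (pool_count : Int) (out : List (List Int)) : Decidable (Spec_snake_seeding participants pool_count out) := by unfold Spec_snake_seeding; infer_instance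

-- ===== CLAIM (what is proved, stated in full; the proofs are below) =====
def Claim_equal_snake_seeding : Prop := ∀ (participants : List Int) (pool_count : Int), Dom_snake_seeding participants pool_count → Pre_snake_seeding participants pool_count → Spec_snake_seeding participants pool_count (snake_seeding participants pool_count)

-- ===== LEMMAS AND PROOFS =====

-- on row `row`, element j of the row (global index row*p + j), A's placement = B's placement
lemma pvAStep_eq_row (p row j : Int) (hp : 1 ≤ p) (hj0 : 0 ≤ j) (hjp : j < p)
    (gs : List (List Int)) (x : Int) :
    pvAStep p gs (row * p + j, x)
      = pvAppendAt gs (if PySem.Int.mod row 2 ≠ 0 then p - 1 - j else j) x := by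
  have hpp : (0 : Int) < p := by omega
  have hrw : row * p + j = j + p * row := by ring
  have hmod : PySem.Int.mod (row * p + j) p = j := by
    rw [PySem.Int.mod_eq_emod_of_pos hpp, hrw, Int.add_mul_emod_self_left,
      Int.emod_eq_of_lt hj0 hjp]
  have hdiv : PySem.Int.floordiv (row * p + j) p = row := by
    rw [PySem.Int.floordiv_eq_ediv_of_pos hpp, hrw, Int.add_mul_ediv_left _ _ (by omega : p ≠ 0),
      Int.ediv_eq_zero_of_lt hj0 hjp]
    ring
  have h2 : PySem.Int.mod row 2 = row % 2 := PySem.Int.mod_eq_emod_of_pos (by omega)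
  have hiff : (PySem.Int.mod row 2 = 1) ↔ (PySem.Int.mod row 2 ≠ 0) := by
    rw [h2]; omega
  simp only [pvAStep, hmod, hdiv]
  by_cases h : PySem.Int.mod row 2 = 1
  · rw [if_pos h, if_pos (hiff.mp h)]
  · rw [if_neg h, if_neg (fun hne => h (hiff.mpr hne))]

-- A's fold over one enumerated row equals B's inner placement fold
lemma pvChunk_fold (p row : Int) (hp : 1 ≤ p) :
    ∀ (chunk : List Int) (j : Int) (gs : List (List Int)), 0 ≤ j → j + chunk.length ≤ p →
    (PySem.List.enumerate chunk (row * p + j)).foldl (pvAStep p) gs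
      = (PySem.List.enumerate chunk j).foldl
          (fun gs q => pvAppendAt gs (if PySem.Int.mod row 2 ≠ 0 then p - 1 - q.1 else q.1) q.2) gs
  | [], j, gs, _, _ => by simp [PySem.List.enumerate_nil]
  | x :: xs, j, gs, hj0, hjp => by
    rw [PySem.List.enumerate_cons, PySem.List.enumerate_cons]
    simp only [List.foldl_cons]
    have hx : pvAStep p gs (row * p + j, x)
        = pvAppendAt gs (if PySem.Int.mod row 2 ≠ 0 then p - 1 - j else j) x :=
      pvAStep_eq_row p row j hp hj0 (by simp at hjp; omega) gs x
    rw [hx, show row * p + j + 1 = row * p + (j + 1) by ring]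
    exact pvChunk_fold p row hp xs (j + 1) _ (by omega) (by simp at hjp ⊢; omega)

-- main loop invariant: A's remaining fold (from global index row*p) equals B's loop
lemma pvLoop_eq (participants : List Int) (p : Int) (hp : 1 ≤ p) :
    ∀ (fuel : Nat) (row : Int) (gs : List (List Int)), 0 ≤ row →
    (participants.drop (row * p).toNat).length ≤ fuel →
    (PySem.List.enumerate (participants.drop (row * p).toNat) (row * p)).foldl (pvAStep p) gs
      = pvBLoop participants p fuel (row * p) row gs := by
  intro fuel
  induction fuel with
  | zero =>
    intro row gs hrow hlen
    have : participants.drop (row * p).toNat = [] := List.eq_nil_of_length_eq_zero (by omega)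
    simp [pvBLoop, this, PySem.List.enumerate_nil]
  | succ fuel ih =>
    intro row gs hrow hlen
    set start : Int := row * p with hstart
    have hs0 : 0 ≤ start := by positivity
    by_cases hlt : start < (participants.length : Int)
    · -- loop body runs
      set rest := participants.drop start.toNat with hrest
      have hrestne : rest ≠ [] := by
        simp only [hrest, ne_eq, List.drop_eq_nil_iff]
        omega
      have hchunk : PySem.List.slice participants (some start) (some (start + p))
          = rest.take p.toNat := by
        rw [PySem.List.slice_toNat participants hs0 (by omega)]
        congr 1
        omega
      have hsplit : rest = rest.take p.toNat ++ rest.drop p.toNat := (List.take_append_drop _ _).symm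
      have hnext : (start + p).toNat = start.toNat + p.toNat := by omega
      have hrest2 : rest.drop p.toNat = participants.drop ((row + 1) * p).toNat := by
        rw [hrest, List.drop_drop, show (row + 1) * p = start + p by rw [hstart]; ring, hnext]
      rw [pvBLoop, if_pos hlt, hchunk]
      conv_lhs => rw [hsplit]
      rw [PySem.List.enumerate_append, List.foldl_append]
      have hchunkfold :
          (PySem.List.enumerate (rest.take p.toNat) start).foldl (pvAStep p) gs
            = pvPlaceRow p row gs (rest.take p.toNat) := by
        rw [pvPlaceRow, show start = row * p + 0 from by omega]
        exact pvChunk_fold p row hp (rest.take p.toNat) 0 gs le_rfl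
          (by simp [List.length_take]; omega)
      rw [hchunkfold]
      by_cases hshort : rest.drop p.toNat = []
      · -- last (possibly partial) row: nothing left on either side
        have hdrop : participants.drop ((row + 1) * p).toNat = [] := by
          rw [← hrest2]; exact hshort
        have hih := ih (row + 1) (pvPlaceRow p row gs (rest.take p.toNat)) (by omega)
          (by rw [hdrop]; simp)
        rw [hdrop, PySem.List.enumerate_nil, List.foldl_nil] at hih
        rw [hshort, PySem.List.enumerate_nil, List.foldl_nil,
          show start + p = (row + 1) * p from by rw [hstart]; ring]
        exact hih
      · -- full row: the next global index is (row+1)*p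
        have hple : p.toNat ≤ rest.length := by
          by_contra hc
          exact hshort (List.drop_eq_nil_iff.mpr (by omega))
        have hfull : ((rest.take p.toNat).length : Int) = p := by
          simp [List.length_take]
          omega
        have hnext2 : ((row + 1) * p).toNat = start.toNat + p.toNat := by
          rw [show (row + 1) * p = start + p from by rw [hstart]; ring]
          omega
        have hlen2 : (participants.drop ((row + 1) * p).toNat).length ≤ fuel := by
          rw [← hrest2]
          simp only [List.length_drop]
          omega
        have hih := ih (row + 1) (pvPlaceRow p row gs (rest.take p.toNat)) (by omega) hlen2
        rw [← hrest2] at hih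
        rw [hfull, show start + p = (row + 1) * p from by rw [hstart]; ring]
        exact hih
    · -- start past the end: both sides return gs
      have : participants.drop start.toNat = [] := List.drop_eq_nil_iff.mpr (by omega)
      rw [pvBLoop, if_neg hlt, this]
      simp [PySem.List.enumerate_nil]

-- ===== VERDICT (by name: the statement is the Claim_ definition above) =====
theorem snake_seeding_spec : Claim_equal_snake_seeding := by
  intro participants p _ hpre
  unfold Spec_snake_seeding
  rcases hpre with hp | hnil
  · -- pool_count ≥ 1: the loop invariant at row 0
    have h := pvLoop_eq participants p hp participants.length 0
      ((PySem.List.pyRange 0 p 1).map (fun _ => ([] : List Int))) le_rfl (by simp)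
    simp only [zero_mul, Int.toNat_zero, List.drop_zero] at h
    simpa [snake_seeding, snake_seeding_alt] using h
  · subst hnil
    rfl
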